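-- pv_equiv track=rewrite | github.com/Upsonic/Server | upsonic_on_prem/api/utils/scope.py | split_dotted_string
-- ===== SOURCE A (Python) =====
-- def split_dotted_string(s):
--     results = []
--     while "." in s:
--         results.append(s)
--         s = s.rsplit(".", 1)[0]
--     results.append(s)
--     results = results[1:]
--     return results
-- ===== SOURCE B (Python) =====
-- def split_dotted_string(s):
--     parts = s.split(".")
--     return [".".join(parts[:i]) for i in range(len(parts) - 1, 0, -1)]
-- ===== Notes on version B (the rewrite author's own statement) =====
-- stated objective: simpler
-- what changed: B splits the string into its dot-separated components once and builds each prefix by joining an initial slice of that list over a descending range, instead of A's while-loop that repeatedly rsplits a shrinking string and then drops the first result.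
import Mathlib
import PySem

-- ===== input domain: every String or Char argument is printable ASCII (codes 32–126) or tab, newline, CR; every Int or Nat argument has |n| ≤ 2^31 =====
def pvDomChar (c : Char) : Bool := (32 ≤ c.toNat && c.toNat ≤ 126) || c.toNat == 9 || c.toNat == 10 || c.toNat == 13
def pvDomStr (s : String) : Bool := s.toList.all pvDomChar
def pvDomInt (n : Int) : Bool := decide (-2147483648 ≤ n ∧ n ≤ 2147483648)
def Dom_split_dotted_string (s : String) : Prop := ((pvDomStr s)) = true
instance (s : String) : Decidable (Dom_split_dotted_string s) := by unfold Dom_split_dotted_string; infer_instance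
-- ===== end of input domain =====

-- B replaces A's repeated-rsplit while-loop by one split('.') plus prefix joins over a
-- descending range (objective: simpler); same return value on every input.

-- ===== PORT A =====
-- hand port of s.rsplit(".", 1)[0]: exact whenever '.' ∈ cs (the only place A uses it)
def pvRsplit1Head (cs : List Char) : List Char :=
  ((cs.reverse.dropWhile (fun c => !(c == '.'))).drop 1).reverse

theorem pvRsplit1Head_length_lt (cs : List Char) (h : '.' ∈ cs) :
    (pvRsplit1Head cs).length < cs.length := by
  have hne : cs.reverse.dropWhile (fun c => !(c == '.')) ≠ [] := by
    intro hnil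
    have := (List.dropWhile_eq_nil_iff).mp hnil '.' (by simpa using h)
    simp at this
  have hle : (cs.reverse.dropWhile (fun c => !(c == '.'))).length ≤ cs.length := by
    simpa using List.length_dropWhile_le (fun c => !(c == '.')) cs.reverse
  have hpos : 0 < (cs.reverse.dropWhile (fun c => !(c == '.'))).length :=
    List.length_pos_of_ne_nil hne
  simp only [pvRsplit1Head, List.length_reverse, List.length_drop]
  omega

-- while "." in s: results.append(s); s = s.rsplit(".", 1)[0]; then results.append(s)
def pvALoop (cs : List Char) : List (List Char) :=
  if PySem.Chars.isIn ['.'] cs then cs :: pvALoop (pvRsplit1Head cs) else [cs]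
termination_by cs.length
decreasing_by
  refine pvRsplit1Head_length_lt _ ?_
  have h : ['.'] <:+: cs := (PySem.Chars.isIn_iff_infix ['.'] cs).mp (by assumption)
  exact List.singleton_sublist.mp h.sublist

def split_dotted_string (s : String) : List String :=
  ((pvALoop s.toList).map String.ofList).drop 1   -- results = results[1:]

-- ===== PORT B =====
def split_dotted_string_alt (s : String) : List String :=
  let parts := PySem.Chars.splitOn s.toList ['.']
  (PySem.List.pyRange ((parts.length : Int) - 1) 0 (-1)).map
    (fun i => String.ofList (PySem.Chars.join ['.'] (PySem.List.slice parts none (some i))))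

-- ===== PRECONDITION & SPEC =====
def Spec_split_dotted_string (s : String) (out : List String) : Prop := out = split_dotted_string_alt s
instance (s : String) (out : List String) : Decidable (Spec_split_dotted_string s out) := by unfold Spec_split_dotted_string; infer_instance

-- ===== CLAIM (what is proved, stated in full; the proofs are below) =====
def Claim_equal_split_dotted_string : Prop := ∀ (s : String), Dom_split_dotted_string s → Spec_split_dotted_string s (split_dotted_string s)

-- ===== LEMMAS AND PROOFS =====

-- a structural single-char split, used only in the proofs
def pvConsHead (x : List Char) : List (List Char) → List (List Char)
  | [] => [x]
  | p :: ps => (x ++ p) :: ps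

def pvSplit : List Char → List (List Char)
  | [] => [[]]
  | c :: rest => if c == '.' then [] :: pvSplit rest else pvConsHead [c] (pvSplit rest)

theorem pvSplit_ne_nil (cs : List Char) : pvSplit cs ≠ [] := by
  cases cs with
  | nil => simp [pvSplit]
  | cons c rest =>
    simp only [pvSplit]
    split
    · simp
    · cases h : pvSplit rest <;> simp [pvConsHead]

theorem pvConsHead_append (x y : List Char) (ys : List (List Char)) :
    pvConsHead (x ++ y) ys = pvConsHead x (pvConsHead y ys) := by
  cases ys <;> simp [pvConsHead]

theorem pvConsHead_nil (ys : List (List Char)) (h : ys ≠ []) : pvConsHead [] ys = ys := by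
  cases ys with
  | nil => exact absurd rfl h
  | cons p ps => simp [pvConsHead]

theorem pvGo_eq (l : List Char) : ∀ (fuel : Nat) (cur : List Char) (acc : List (List Char)),
    l.length ≤ fuel →
    PySem.Chars.splitOn.go ['.'] fuel l cur acc
      = acc.reverse ++ pvConsHead cur.reverse (pvSplit l) := by
  induction l with
  | nil =>
    intro fuel cur acc _
    cases fuel <;> simp [PySem.Chars.splitOn.go, pvSplit, pvConsHead]
  | cons c rest ih =>
    intro fuel cur acc hf
    cases fuel with
    | zero => simp at hf
    | succ f =>
      simp only [PySem.Chars.splitOn.go]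
      by_cases hc : c = '.'
      · subst hc
        simp only [List.isPrefixOf, beq_self_eq_true, Bool.true_and,
          if_pos, List.length_singleton, List.drop_one, List.tail_cons]
        rw [ih f [] (cur.reverse :: acc) (by simpa using Nat.le_of_succ_le_succ hf)]
        simp only [List.reverse_cons, List.reverse_nil, List.append_assoc]
        rw [pvConsHead_nil _ (pvSplit_ne_nil rest)]
        simp [pvSplit, pvConsHead]
      · rw [show (List.isPrefixOf ['.'] (c :: rest)) = false by
          simp [List.isPrefixOf]; exact fun h => absurd h.symm hc]
        simp only [if_false, Bool.false_eq_true]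
        rw [ih f (c :: cur) acc (by simpa using Nat.le_of_succ_le_succ hf)]
        simp only [List.reverse_cons]
        rw [pvConsHead_append]
        simp [pvSplit, hc, pvConsHead]

theorem splitOn_eq_pvSplit (cs : List Char) :
    PySem.Chars.splitOn cs ['.'] = pvSplit cs := by
  unfold PySem.Chars.splitOn
  rw [pvGo_eq cs (cs.length + 1) [] [] (Nat.le_succ _)]
  simpa using pvConsHead_nil _ (pvSplit_ne_nil cs)

-- join with a single dot
def pvJoin (parts : List (List Char)) : List Char := PySem.Chars.join ['.'] parts

theorem pvJoin_cons (p : List Char) (ps : List (List Char)) :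
    pvJoin (p :: ps) = p ++ (if ps = [] then [] else '.' :: pvJoin ps) := by
  cases ps with
  | nil => simp [pvJoin, PySem.Chars.join, List.intercalate]
  | cons q qs => simp [pvJoin, PySem.Chars.join, List.intercalate, List.intersperse]

theorem pvJoin_pvSplit (cs : List Char) : pvJoin (pvSplit cs) = cs := by
  induction cs with
  | nil => simp [pvSplit, pvJoin, PySem.Chars.join, List.intercalate]
  | cons c rest ih =>
    simp only [pvSplit]
    by_cases hc : c = '.'
    · subst hc
      rw [if_pos (by simp)]
      rw [pvJoin_cons]
      simp [if_neg (pvSplit_ne_nil rest), ih]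
    · rw [if_neg (by simpa using hc)]
      cases h : pvSplit rest with
      | nil => exact absurd h (pvSplit_ne_nil rest)
      | cons p ps =>
        simp only [pvConsHead]
        rw [pvJoin_cons]
        rw [h, pvJoin_cons] at ih
        simp [← ih]

theorem pvSplit_no_dot (cs : List Char) : ∀ p ∈ pvSplit cs, '.' ∉ p := by
  induction cs with
  | nil => simp [pvSplit]
  | cons c rest ih =>
    simp only [pvSplit]
    by_cases hc : c = '.'
    · subst hc
      rw [if_pos (by simp)]
      intro p hp
      rcases List.mem_cons.mp hp with hp | hp
      · simp [hp]
      · exact ih p hp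
    · rw [if_neg (by simpa using hc)]
      cases h : pvSplit rest with
      | nil => exact absurd h (pvSplit_ne_nil rest)
      | cons q qs =>
        intro p hp
        simp only [pvConsHead, List.mem_cons] at hp
        rcases hp with hp | hp
        · subst hp
          simp only [List.mem_append, List.mem_singleton]
          rintro (h1 | h1)
          · exact hc h1.symm
          · exact ih q (h ▸ List.mem_cons_self ..) h1
        · exact ih p (h ▸ List.mem_cons_of_mem _ hp)

theorem pvJoin_append_last (ps : List (List Char)) (last : List Char) (h : ps ≠ []) :
    pvJoin (ps ++ [last]) = pvJoin ps ++ '.' :: last := by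
  induction ps with
  | nil => exact absurd rfl h
  | cons p ps ih =>
    cases ps with
    | nil => simp [pvJoin_cons]
    | cons q qs =>
      rw [List.cons_append, pvJoin_cons, pvJoin_cons (ps := q :: qs)]
      rw [ih (by simp)]
      simp

theorem pvRsplit1Head_join (ps : List (List Char)) (last : List Char)
    (hps : ps ≠ []) (hlast : '.' ∉ last) :
    pvRsplit1Head (pvJoin (ps ++ [last])) = pvJoin ps := by
  rw [pvJoin_append_last ps last hps]
  unfold pvRsplit1Head
  rw [List.reverse_append]
  simp only [List.reverse_cons, List.append_assoc]
  rw [List.dropWhile_append]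
  rw [if_pos (by
    simp only [List.isEmpty_iff]
    refine List.dropWhile_eq_nil_iff.mpr ?_
    intro x hx
    simp only [Bool.not_eq_true']
    exact beq_eq_false_iff_ne.mpr
      (fun hxe => absurd (hxe ▸ List.mem_reverse.mp hx) hlast))]
  simp

theorem isIn_dot_iff (cs : List Char) :
    PySem.Chars.isIn ['.'] cs = true ↔ '.' ∈ cs := by
  rw [PySem.Chars.isIn_iff_infix]
  constructor
  · exact fun h => List.singleton_sublist.mp h.sublist
  · intro h
    rcases List.append_of_mem h with ⟨pre, post, rfl⟩
    exact ⟨pre, post, by simp⟩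

-- the decreasing-length list A builds: prefixes of i = n, n-1, …, 1 components
def pvDesc (parts : List (List Char)) : List (List Char) :=
  (List.range parts.length).map (fun k => pvJoin (parts.take (parts.length - k)))

theorem pvALoop_join (parts : List (List Char)) (hne : parts ≠ [])
    (hnd : ∀ p ∈ parts, '.' ∉ p) : pvALoop (pvJoin parts) = pvDesc parts := by
  induction parts using List.reverseRecOn with
  | nil => exact absurd rfl hne
  | append_singleton ps last ih =>
    by_cases hps' : ps = []
    · subst hps'
      rw [pvALoop]
      rw [if_neg (by
        simp only [Bool.not_eq_true]
        rw [← Bool.not_eq_true, isIn_dot_iff]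
        have := hnd last (by simp)
        simpa [pvJoin_cons] using this)]
      simp [pvDesc, pvJoin_cons]
    · have hlast : '.' ∉ last := hnd last (by simp)
      rw [pvALoop]
      rw [if_pos (by
        rw [isIn_dot_iff, pvJoin_append_last ps last hps']
        simp)]
      rw [pvRsplit1Head_join ps last hps' hlast]
      rw [ih hps' (fun p hp => hnd p (List.mem_append_left _ hp))]
      -- pvDesc (ps ++ [last]) = pvJoin (ps ++ [last]) :: pvDesc ps
      unfold pvDesc
      rw [List.length_append, List.length_singleton]
      rw [List.range_succ_eq_map]
      simp only [List.map_cons, Nat.sub_zero, List.map_map]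
      congr 1
      · rw [List.take_of_length_le (by simp)]
      · refine (List.map_congr_left ?_).symm
        intro k hk
        simp only [List.mem_range] at hk
        simp only [Function.comp_apply]
        rw [List.take_append_of_le_length (by omega)]
        congr 2
        omega

theorem pvDesc_drop_one (parts : List (List Char)) (hne : parts ≠ []) :
    (pvDesc parts).drop 1
      = (List.range (parts.length - 1)).map
          (fun k => pvJoin (parts.take (parts.length - 1 - k))) := by
  unfold pvDesc
  cases h : parts.length with
  | zero => exact absurd (List.length_eq_zero_iff.mp h) hne
  | succ m =>
    rw [List.range_succ_eq_map]
    simp only [List.map_cons, List.drop_succ_cons, List.drop_zero, List.map_map]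
    refine List.map_congr_left ?_
    intro k hk
    simp only [List.mem_range] at hk
    simp only [Function.comp_apply]
    congr 2
    omega

-- ===== VERDICT (by name: the statement is the Claim_ definition above) =====
theorem split_dotted_string_spec : Claim_equal_split_dotted_string := by
  intro s _
  unfold Spec_split_dotted_string split_dotted_string
  simp only [split_dotted_string_alt, splitOn_eq_pvSplit]
  set cs := s.toList with hcs
  set parts := pvSplit cs with hparts
  have hne : parts ≠ [] := pvSplit_ne_nil cs
  have hjoin : pvJoin parts = cs := pvJoin_pvSplit cs
  have hnd : ∀ p ∈ parts, '.' ∉ p := pvSplit_no_dot cs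
  rw [← hjoin, pvALoop_join parts hne hnd]
  rw [← List.map_drop, pvDesc_drop_one parts hne]
  rw [PySem.List.pyRange_neg_one]
  rw [List.map_map, List.map_map]
  have hlen : ((parts.length : Int) - 1 - 0).toNat = parts.length - 1 := by omega
  rw [hlen]
  refine List.map_congr_left ?_
  intro k hk
  simp only [List.mem_range] at hk
  simp only [Function.comp_apply]
  congr 1
  rw [PySem.List.slice_to parts (by omega)]
  congr 2
  omega
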